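-- pv_equiv track=rewrite | github.com/luigim1998/contrucao_compiladores_2020.1 | analisador_lexico/lexical_analyser.py | separate_text_strings
-- ===== SOURCE A (Python) =====
-- def separate_text_strings(text):
--     cont = 0
--     # Estados de state:
--     # 0 - fora de uma string
--     # 1 - dentro da string
--     # 2 - dentro da string e analisando o que vem depois do '\'
--     state = 0
--     last_cut = 0
--     out = []
--
--     while(cont < len(text)):
--
--         if(state == 0):
--             if(text[cont] == "\""):
--                 state = 1
--                 if(len(text[last_cut:cont])): out.append(text[last_cut:cont])
--                 last_cut = cont
--         elif(state == 1):
--             if(text[cont] == "\""):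
--                 state = 0
--                 if(len(text[last_cut:cont+1])): out.append(text[last_cut:cont+1])
--                 last_cut = cont + 1
--             elif(text[cont] == "\\"):
--                 state = 2
--             elif(text[cont] == "\n"):
--                 state = 0
--                 if(len(text[last_cut:cont+1])): out.append(text[last_cut:cont+1])
--                 last_cut = cont+1
--         else: #state == 2
--             state = 1
--
--         cont += 1
--
--     if(len(text[last_cut:])): out.append(text[last_cut:])
--
--     return out
-- ===== SOURCE B (Python) =====
-- def separate_text_strings(text):
--     n = len(text)
--     i = 0
--     out = []
--     while i < n:
--         start = i
--         while i < n and text[i] != '"':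
--             i += 1
--         if i > start:
--             out.append(text[start:i])
--         if i >= n:
--             break
--         # scan the string literal beginning at the quote text[i]
--         j = i + 1
--         while j < n:
--             if text[j] == '\\':
--                 j += 2
--             elif text[j] == '"' or text[j] == '\n':
--                 j += 1
--                 break
--             else:
--                 j += 1
--         out.append(text[i:j])
--         i = j
--     return out
-- ===== Notes on version B (the rewrite author's own statement) =====
-- stated objective: alternative
-- what changed: Replaced the 3-state machine with last_cut tracking by an index-based outer loop with two inner loops: one consuming a non-string segment up to the next quote, one scanning the string literal (advancing 2 past backslashes), emitting each slice directly.
import Mathlib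
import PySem

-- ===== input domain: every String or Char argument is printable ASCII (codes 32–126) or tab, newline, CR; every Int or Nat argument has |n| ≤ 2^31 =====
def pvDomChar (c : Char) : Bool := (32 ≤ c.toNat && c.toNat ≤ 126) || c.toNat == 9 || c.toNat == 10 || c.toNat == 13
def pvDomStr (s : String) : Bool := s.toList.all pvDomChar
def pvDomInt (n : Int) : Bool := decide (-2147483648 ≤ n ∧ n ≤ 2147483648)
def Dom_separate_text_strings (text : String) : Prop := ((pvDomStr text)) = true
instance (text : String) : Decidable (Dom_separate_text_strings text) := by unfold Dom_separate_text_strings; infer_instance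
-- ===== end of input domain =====

-- B replaces A's 3-state machine + last_cut bookkeeping by an index-based outer loop
-- with two inner scans emitting slices directly; same cost, different decomposition.
-- Loops are ported with a structural fuel argument (fuel = length of the text, always
-- sufficient: every iteration advances the index by at least one).

-- text[a:b] for 0 ≤ a ≤ b: exact (Python clamps both ends, and so does drop/take).
def pvSlice (t : List Char) (a b : Nat) : String := String.ofList ((t.drop a).take (b - a))

-- ===== PORT A =====
-- A's while loop: cont, state ∈ {0,1,2}, last_cut, out; one step per character.
-- text[last_cut:] ported as String.ofList (t.drop last_cut) (exact: last_cut ≥ 0).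
-- At fuel 0 (only reachable with cont ≥ length) the loop exits like the else branch.
def loopA (t : List Char) (fuel cont state last_cut : Nat) (out : List String) : List String :=
  match fuel with
  | 0 =>
    if (String.ofList (t.drop last_cut)).length ≠ 0 then out ++ [String.ofList (t.drop last_cut)] else out
  | fuel + 1 =>
    if h : cont < t.length then
      if state = 0 then
        if t[cont]'h = '"' then
          loopA t fuel (cont+1) 1 cont
            (if (pvSlice t last_cut cont).length ≠ 0 then out ++ [pvSlice t last_cut cont] else out)
        else loopA t fuel (cont+1) 0 last_cut out
      else if state = 1 then
        if t[cont]'h = '"' then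
          loopA t fuel (cont+1) 0 (cont+1)
            (if (pvSlice t last_cut (cont+1)).length ≠ 0 then out ++ [pvSlice t last_cut (cont+1)] else out)
        else if t[cont]'h = '\\' then loopA t fuel (cont+1) 2 last_cut out
        else if t[cont]'h = '\n' then
          loopA t fuel (cont+1) 0 (cont+1)
            (if (pvSlice t last_cut (cont+1)).length ≠ 0 then out ++ [pvSlice t last_cut (cont+1)] else out)
        else loopA t fuel (cont+1) 1 last_cut out
      else loopA t fuel (cont+1) 1 last_cut out
    else
      if (String.ofList (t.drop last_cut)).length ≠ 0 then out ++ [String.ofList (t.drop last_cut)] else out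

def separate_text_strings (text : String) : List String :=
  loopA text.toList text.toList.length 0 0 0 []

-- ===== PORT B =====
-- inner loop 1: while i < n and text[i] != '"': i += 1  (returns the final i)
def skipNonStr (t : List Char) (fuel i : Nat) : Nat :=
  match fuel with
  | 0 => i
  | fuel + 1 =>
    if h : i < t.length then
      if t[i]'h = '"' then i else skipNonStr t fuel (i+1)
    else i

-- inner loop 2: from j, advance 2 past a backslash, stop one past '"' or '\n' (returns final j)
def scanLit (t : List Char) (fuel j : Nat) : Nat :=
  match fuel with
  | 0 => j
  | fuel + 1 =>
    if h : j < t.length then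
      if t[j]'h = '\\' then scanLit t fuel (j+2)
      else if t[j]'h = '"' ∨ t[j]'h = '\n' then j + 1
      else scanLit t fuel (j+1)
    else j

-- outer loop of B: consume a non-string segment (emit if nonempty), then if a quote
-- was found scan the literal from it (always emit), and continue past it.
def loopB (t : List Char) (fuel i : Nat) (out : List String) : List String :=
  match fuel with
  | 0 => out
  | fuel + 1 =>
    if _hi : i < t.length then
      if _hk : skipNonStr t t.length i < t.length then
        loopB t fuel (scanLit t t.length (skipNonStr t t.length i + 1))
          ((if i < skipNonStr t t.length i then out ++ [pvSlice t i (skipNonStr t t.length i)] else out)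
            ++ [pvSlice t (skipNonStr t t.length i) (scanLit t t.length (skipNonStr t t.length i + 1))])
      else (if i < skipNonStr t t.length i then out ++ [pvSlice t i (skipNonStr t t.length i)] else out)
    else out

def separate_text_strings_alt (text : String) : List String :=
  loopB text.toList text.toList.length 0 []

-- ===== PRECONDITION & SPEC =====
def Spec_separate_text_strings (text : String) (out : List String) : Prop := out = separate_text_strings_alt text
instance (text : String) (out : List String) : Decidable (Spec_separate_text_strings text out) := by unfold Spec_separate_text_strings; infer_instance

-- ===== CLAIM (what is proved, stated in full; the proofs are below) =====
def Claim_equal_separate_text_strings : Prop := ∀ (text : String), Dom_separate_text_strings text → Spec_separate_text_strings text (separate_text_strings text)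

-- ===== LEMMAS AND PROOFS =====

-- basic bounds
theorem skipNonStr_ge (t : List Char) (fuel i : Nat) : i ≤ skipNonStr t fuel i := by
  induction fuel generalizing i with
  | zero => simp [skipNonStr]
  | succ f ih =>
    rw [skipNonStr]
    split_ifs <;> first | omega | (have := ih (i+1); omega)

theorem skipNonStr_le (t : List Char) (fuel i : Nat) (hi : i ≤ t.length) :
    skipNonStr t fuel i ≤ t.length := by
  induction fuel generalizing i with
  | zero => simpa [skipNonStr]
  | succ f ih =>
    rw [skipNonStr]
    split_ifs <;> first | omega | (have := ih (i+1) (by omega); omega)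

theorem scanLit_ge (t : List Char) (fuel j : Nat) : j ≤ scanLit t fuel j := by
  induction fuel generalizing j with
  | zero => simp [scanLit]
  | succ f ih =>
    rw [scanLit]
    split_ifs <;> first | omega | (have := ih (j+2); omega) | (have := ih (j+1); omega)

-- single-step unfoldings of A's loop
theorem A_step0_quote (t : List Char) (f i lc : Nat) (out : List String)
    (h : i < t.length) (hc : t[i]'h = '"') :
    loopA t (f+1) i 0 lc out =
      loopA t f (i+1) 1 i (if (pvSlice t lc i).length ≠ 0 then out ++ [pvSlice t lc i] else out) := by
  rw [loopA]; simp only [dif_pos h, reduceIte, hc, Char.reduceEq]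

theorem A_step0_other (t : List Char) (f i lc : Nat) (out : List String)
    (h : i < t.length) (hc : t[i]'h ≠ '"') :
    loopA t (f+1) i 0 lc out = loopA t f (i+1) 0 lc out := by
  rw [loopA]; simp only [dif_pos h, reduceIte, if_neg hc]

theorem A_step1_quote (t : List Char) (f j q : Nat) (out : List String)
    (h : j < t.length) (hc : t[j]'h = '"') :
    loopA t (f+1) j 1 q out =
      loopA t f (j+1) 0 (j+1) (if (pvSlice t q (j+1)).length ≠ 0 then out ++ [pvSlice t q (j+1)] else out) := by
  rw [loopA]
  simp only [dif_pos h, reduceIte, hc, Char.reduceEq, show ¬(1:Nat)=0 by decide]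

theorem A_step1_bs (t : List Char) (f j q : Nat) (out : List String)
    (h : j < t.length) (hc : t[j]'h = '\\') :
    loopA t (f+1) j 1 q out = loopA t f (j+1) 2 q out := by
  rw [loopA]
  simp only [dif_pos h, reduceIte, hc, Char.reduceEq, show ¬(1:Nat)=0 by decide]

theorem A_step1_nl (t : List Char) (f j q : Nat) (out : List String)
    (h : j < t.length) (hc : t[j]'h = '\n') :
    loopA t (f+1) j 1 q out =
      loopA t f (j+1) 0 (j+1) (if (pvSlice t q (j+1)).length ≠ 0 then out ++ [pvSlice t q (j+1)] else out) := by
  rw [loopA]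
  simp only [dif_pos h, reduceIte, hc, Char.reduceEq, show ¬(1:Nat)=0 by decide]

theorem A_step1_other (t : List Char) (f j q : Nat) (out : List String)
    (h : j < t.length) (h1 : t[j]'h ≠ '"') (h2 : t[j]'h ≠ '\\') (h3 : t[j]'h ≠ '\n') :
    loopA t (f+1) j 1 q out = loopA t f (j+1) 1 q out := by
  rw [loopA]
  simp only [dif_pos h, reduceIte, if_neg h1, if_neg h2, if_neg h3, show ¬(1:Nat)=0 by decide]

theorem A_step2 (t : List Char) (f j q : Nat) (out : List String) (h : j < t.length) :
    loopA t (f+1) j 2 q out = loopA t f (j+1) 1 q out := by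
  rw [loopA]
  simp only [dif_pos h, reduceIte, show ¬(2:Nat)=0 by decide, show ¬(2:Nat)=1 by decide]

theorem loopA_exhaust (t : List Char) (f cont s lc : Nat) (out : List String)
    (h : t.length ≤ cont) :
    loopA t f cont s lc out =
      (if (String.ofList (t.drop lc)).length ≠ 0 then out ++ [String.ofList (t.drop lc)] else out) := by
  cases f with
  | zero => rfl
  | succ g => rw [loopA]; simp [show ¬ cont < t.length by omega]

theorem loopA_fuel (t : List Char) (f1 f2 cont s lc : Nat) (out : List String)
    (h1 : t.length ≤ f1 + cont) (h2 : t.length ≤ f2 + cont) :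
    loopA t f1 cont s lc out = loopA t f2 cont s lc out := by
  induction f1 generalizing f2 cont s lc out with
  | zero =>
    rw [loopA_exhaust t 0 cont s lc out (by omega), loopA_exhaust t f2 cont s lc out (by omega)]
  | succ f ih =>
    by_cases h : cont < t.length
    · cases f2 with
      | zero => omega
      | succ g =>
        rw [loopA, loopA]
        simp only [dif_pos h]
        split_ifs <;> exact ih g (cont+1) _ _ _ (by omega) (by omega)
    · rw [loopA_exhaust t (f+1) cont s lc out (by omega),
          loopA_exhaust t f2 cont s lc out (by omega)]

-- single-step unfoldings of B's inner scans
theorem skip_quote (t : List Char) (f i : Nat) (h : i < t.length) (hc : t[i]'h = '"') :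
    skipNonStr t (f+1) i = i := by
  rw [skipNonStr]; simp [h, hc]

theorem skip_other (t : List Char) (f i : Nat) (h : i < t.length) (hc : t[i]'h ≠ '"') :
    skipNonStr t (f+1) i = skipNonStr t f (i+1) := by
  rw [skipNonStr]; simp only [dif_pos h, if_neg hc]

theorem skip_exhaust (t : List Char) (f i : Nat) (h : t.length ≤ i) :
    skipNonStr t f i = i := by
  cases f <;> simp [skipNonStr, show ¬ i < t.length by omega]

theorem skipNonStr_fuel (t : List Char) (f1 f2 i : Nat)
    (h1 : t.length ≤ f1 + i) (h2 : t.length ≤ f2 + i) :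
    skipNonStr t f1 i = skipNonStr t f2 i := by
  induction f1 generalizing f2 i with
  | zero =>
    rw [skip_exhaust t 0 i (by omega), skip_exhaust t f2 i (by omega)]
  | succ f ih =>
    by_cases h : i < t.length
    · cases f2 with
      | zero => omega
      | succ g =>
        by_cases hc : t[i]'h = '"'
        · rw [skip_quote t f i h hc, skip_quote t g i h hc]
        · rw [skip_other t f i h hc, skip_other t g i h hc]
          exact ih g (i+1) (by omega) (by omega)
    · rw [skip_exhaust t (f+1) i (by omega), skip_exhaust t f2 i (by omega)]

theorem scan_bs (t : List Char) (f j : Nat) (h : j < t.length) (hc : t[j]'h = '\\') :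
    scanLit t (f+1) j = scanLit t f (j+2) := by
  rw [scanLit]; simp only [dif_pos h, hc, Char.reduceEq, reduceIte]

theorem scan_close (t : List Char) (f j : Nat) (h : j < t.length)
    (hc : t[j]'h = '"' ∨ t[j]'h = '\n') :
    scanLit t (f+1) j = j + 1 := by
  rw [scanLit]
  rcases hc with hc | hc <;>
    simp only [dif_pos h, hc, Char.reduceEq, reduceIte, true_or, or_true]

theorem scan_other (t : List Char) (f j : Nat) (h : j < t.length)
    (hb : t[j]'h ≠ '\\') (ho : ¬ (t[j]'h = '"' ∨ t[j]'h = '\n')) :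
    scanLit t (f+1) j = scanLit t f (j+1) := by
  rw [scanLit]; simp only [dif_pos h, if_neg hb, if_neg ho]

theorem scan_exhaust (t : List Char) (f j : Nat) (h : t.length ≤ j) :
    scanLit t f j = j := by
  cases f <;> simp [scanLit, show ¬ j < t.length by omega]

theorem scanLit_fuel (t : List Char) (f1 f2 j : Nat)
    (h1 : t.length ≤ f1 + j) (h2 : t.length ≤ f2 + j) :
    scanLit t f1 j = scanLit t f2 j := by
  induction f1 generalizing f2 j with
  | zero =>
    rw [scan_exhaust t 0 j (by omega), scan_exhaust t f2 j (by omega)]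
  | succ f ih =>
    by_cases h : j < t.length
    · cases f2 with
      | zero => omega
      | succ g =>
        by_cases hb : t[j]'h = '\\'
        · rw [scan_bs t f j h hb, scan_bs t g j h hb]
          exact ih g (j+2) (by omega) (by omega)
        · by_cases ho : t[j]'h = '"' ∨ t[j]'h = '\n'
          · rw [scan_close t f j h ho, scan_close t g j h ho]
          · rw [scan_other t f j h hb ho, scan_other t g j h hb ho]
            exact ih g (j+1) (by omega) (by omega)
    · rw [scan_exhaust t (f+1) j (by omega), scan_exhaust t f2 j (by omega)]

-- slice facts
theorem pvSlice_len (t : List Char) (a b : Nat) :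
    (pvSlice t a b).length = min (b - a) (t.length - a) := by
  simp [pvSlice]

theorem drop_len_str (t : List Char) (a : Nat) :
    (String.ofList (t.drop a)).length = t.length - a := by
  simp

theorem pvSlice_all (t : List Char) (a b : Nat) (hb : t.length ≤ b) :
    pvSlice t a b = String.ofList (t.drop a) := by
  unfold pvSlice
  congr 1
  apply List.take_of_length_le
  simp; omega

-- A's run through state 1 (and 2) equals one scanLit jump.
theorem A1 (t : List Char) (f j q : Nat) (out : List String)
    (hf : t.length ≤ f + j) (hq : q < t.length) (hqj : q ≤ j) :
    loopA t f j 1 q out =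
      loopA t f (scanLit t f j) 0 (scanLit t f j) (out ++ [pvSlice t q (scanLit t f j)]) := by
  induction f generalizing j out with
  | zero =>
    rw [loopA_exhaust t 0 j 1 q out (by omega)]
    rw [scan_exhaust t 0 j (by omega)]
    rw [loopA_exhaust t 0 j 0 j _ (by omega)]
    rw [pvSlice_all t q j (by omega)]
    have hne : (String.ofList (t.drop q)).length ≠ 0 := by rw [drop_len_str]; omega
    have hd : t.drop j = [] := List.drop_eq_nil_of_le (by omega)
    rw [if_pos hne, hd]
    simp
  | succ f ih =>
    by_cases h : j < t.length
    · by_cases hcq : t[j]'h = '"'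
      · rw [A_step1_quote t f j q out h hcq, scan_close t f j h (Or.inl hcq)]
        have hslice : (pvSlice t q (j+1)).length ≠ 0 := by rw [pvSlice_len]; omega
        rw [if_pos hslice]
        exact loopA_fuel t f (f+1) (j+1) 0 (j+1) _ (by omega) (by omega)
      · by_cases hcb : t[j]'h = '\\'
        · rw [A_step1_bs t f j q out h hcb, scan_bs t f j h hcb]
          by_cases h2 : j + 1 < t.length
          · obtain ⟨g, rfl⟩ : ∃ g, f = g + 1 := ⟨f - 1, by omega⟩
            rw [A_step2 t g (j+1) q out h2]
            rw [loopA_fuel t g (g+1) (j+2) 1 q out (by omega) (by omega)]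
            rw [ih (j+2) out (by omega) (by omega)]
            have hge := scanLit_ge t (g+1) (j+2)
            exact loopA_fuel t (g+1) (g+1+1) _ 0 _ _ (by omega) (by omega)
          · rw [scan_exhaust t f (j+2) (by omega)]
            rw [loopA_exhaust t f (j+1) 2 q out (by omega)]
            rw [loopA_exhaust t (f+1) (j+2) 0 (j+2) _ (by omega)]
            rw [pvSlice_all t q (j+2) (by omega)]
            have hne : (String.ofList (t.drop q)).length ≠ 0 := by rw [drop_len_str]; omega
            have hd : t.drop (j+2) = [] := List.drop_eq_nil_of_le (by omega)
            rw [if_pos hne, hd]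
            simp
        · by_cases hcn : t[j]'h = '\n'
          · rw [A_step1_nl t f j q out h hcn, scan_close t f j h (Or.inr hcn)]
            have hslice : (pvSlice t q (j+1)).length ≠ 0 := by rw [pvSlice_len]; omega
            rw [if_pos hslice]
            exact loopA_fuel t f (f+1) (j+1) 0 (j+1) _ (by omega) (by omega)
          · rw [A_step1_other t f j q out h hcq hcb hcn]
            rw [ih (j+1) out (by omega) (by omega)]
            rw [scan_other t f j h hcb (by tauto)]
            have hge := scanLit_ge t f (j+1)
            exact loopA_fuel t f (f+1) _ 0 _ _ (by omega) (by omega)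
    · rw [loopA_exhaust t (f+1) j 1 q out (by omega)]
      rw [scan_exhaust t (f+1) j (by omega)]
      rw [loopA_exhaust t (f+1) j 0 j _ (by omega)]
      rw [pvSlice_all t q j (by omega)]
      have hne : (String.ofList (t.drop q)).length ≠ 0 := by rw [drop_len_str]; omega
      have hd : t.drop j = [] := List.drop_eq_nil_of_le (by omega)
      rw [if_pos hne, hd]
      simp

-- A's run through state 0 equals one skipNonStr jump (last_cut ≤ i invariant).
theorem A0 (t : List Char) (f i lc : Nat) (out : List String)
    (hf : t.length ≤ f + i) (hlc : lc ≤ i) :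
    loopA t f i 0 lc out =
      (if skipNonStr t f i < t.length then
        loopA t f (skipNonStr t f i + 1) 1 (skipNonStr t f i)
          (if (pvSlice t lc (skipNonStr t f i)).length ≠ 0 then out ++ [pvSlice t lc (skipNonStr t f i)] else out)
      else
        if (String.ofList (t.drop lc)).length ≠ 0 then out ++ [String.ofList (t.drop lc)] else out) := by
  induction f generalizing i out with
  | zero =>
    rw [loopA_exhaust t 0 i 0 lc out (by omega)]
    rw [skip_exhaust t 0 i (by omega), if_neg (show ¬ (i < t.length) by omega)]
  | succ f ih =>
    by_cases h : i < t.length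
    · by_cases hq : t[i]'h = '"'
      · rw [A_step0_quote t f i lc out h hq, skip_quote t f i h hq, if_pos h]
        exact loopA_fuel t f (f+1) (i+1) 1 i _ (by omega) (by omega)
      · rw [A_step0_other t f i lc out h hq]
        rw [ih (i+1) out (by omega) (by omega)]
        rw [skip_other t f i h hq]
        have hge := skipNonStr_ge t f (i+1)
        by_cases hk : skipNonStr t f (i+1) < t.length
        · rw [if_pos hk, if_pos hk]
          exact loopA_fuel t f (f+1) _ 1 _ _ (by omega) (by omega)
        · rw [if_neg hk, if_neg hk]
    · rw [loopA_exhaust t (f+1) i 0 lc out (by omega)]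
      rw [skip_exhaust t (f+1) i (by omega), if_neg (show ¬ (i < t.length) by omega)]

-- Main: A at (i, state 0, last_cut = i) equals B's outer loop at i.
theorem L0 (t : List Char) (f i : Nat) (out : List String) (hf : t.length ≤ f + i) :
    loopA t f i 0 i out = loopB t f i out := by
  induction f generalizing i out with
  | zero =>
    rw [loopA_exhaust t 0 i 0 i out (by omega)]
    have hd : t.drop i = [] := List.drop_eq_nil_of_le (by omega)
    rw [hd]
    simp [loopB]
  | succ f ih =>
    by_cases hi : i < t.length
    · rw [A0 t (f+1) i i out (by omega) (le_refl i)]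
      rw [skipNonStr_fuel t (f+1) t.length i (by omega) (by omega)]
      have hkge := skipNonStr_ge t t.length i
      have hkle := skipNonStr_le t t.length i (by omega)
      have hemit : ((pvSlice t i (skipNonStr t t.length i)).length ≠ 0) ↔ (i < skipNonStr t t.length i) := by
        rw [pvSlice_len]
        constructor <;> intro hh <;> omega
      have hout1 : (if (pvSlice t i (skipNonStr t t.length i)).length ≠ 0 then out ++ [pvSlice t i (skipNonStr t t.length i)] else out)
          = (if i < skipNonStr t t.length i then out ++ [pvSlice t i (skipNonStr t t.length i)] else out) := by
        by_cases hlt : i < skipNonStr t t.length i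
        · rw [if_pos (hemit.mpr hlt), if_pos hlt]
        · rw [if_neg (fun hh => hlt (hemit.mp hh)), if_neg hlt]
      by_cases hk : skipNonStr t t.length i < t.length
      · rw [if_pos hk, hout1]
        rw [A1 t (f+1) (skipNonStr t t.length i + 1) (skipNonStr t t.length i) _ (by omega) hk (by omega)]
        rw [scanLit_fuel t (f+1) t.length (skipNonStr t t.length i + 1) (by omega) (by omega)]
        have hge' := scanLit_ge t t.length (skipNonStr t t.length i + 1)
        rw [loopA_fuel t (f+1) f _ 0 _ _ (by omega) (by omega)]
        rw [ih _ _ (by omega)]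
        rw [loopB]
        simp only [dif_pos hi, dif_pos hk]
      · rw [if_neg hk]
        have hkeq : skipNonStr t t.length i = t.length := by omega
        have hne : (String.ofList (t.drop i)).length ≠ 0 := by rw [drop_len_str]; omega
        rw [if_pos hne]
        rw [loopB]
        simp only [dif_pos hi, dif_neg hk]
        rw [if_pos (by omega), hkeq, pvSlice_all t i t.length (le_refl _)]
    · rw [loopA_exhaust t (f+1) i 0 i out (by omega)]
      have hd : t.drop i = [] := List.drop_eq_nil_of_le (by omega)
      rw [hd, loopB]
      simp [hi]

-- ===== VERDICT (by name: the statement is the Claim_ definition above) =====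
theorem separate_text_strings_spec : Claim_equal_separate_text_strings := by
  intro text _
  unfold Spec_separate_text_strings separate_text_strings separate_text_strings_alt
  exact L0 text.toList text.toList.length 0 [] (by omega)
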